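-- pv_equiv track=rewrite | github.com/RyantheKing/password-game-solver | main.py | sum_25
-- ===== SOURCE A (Python) =====
-- def sum_25(password):
--     # sum all the digits in the string and return the difference from 25
--     le_sum = 0
--     for char in password:
--         if char.isdigit():
--             le_sum += int(char)
--     diff = 25 - le_sum
--     return_str = ""
--     while diff > 9:
--         return_str += "9"
--         diff -= 9
--     return_str += str(diff)
--     return return_str
-- ===== SOURCE B (Python) =====
-- def sum_25(password):
--     diff = 25 - sum(int(c) for c in password if c.isdigit())
--     if diff <= 9:
--         return str(diff)
--     q = (diff - 1) // 9
--     return "9" * q + str(diff - 9 * q)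
-- ===== Notes on version B (the rewrite author's own statement) =====
-- stated objective: simpler
-- what changed: Replaces the greedy while-loop of repeated subtraction by nine with a closed-form quotient/remainder computation and string repetition.
import Mathlib
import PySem

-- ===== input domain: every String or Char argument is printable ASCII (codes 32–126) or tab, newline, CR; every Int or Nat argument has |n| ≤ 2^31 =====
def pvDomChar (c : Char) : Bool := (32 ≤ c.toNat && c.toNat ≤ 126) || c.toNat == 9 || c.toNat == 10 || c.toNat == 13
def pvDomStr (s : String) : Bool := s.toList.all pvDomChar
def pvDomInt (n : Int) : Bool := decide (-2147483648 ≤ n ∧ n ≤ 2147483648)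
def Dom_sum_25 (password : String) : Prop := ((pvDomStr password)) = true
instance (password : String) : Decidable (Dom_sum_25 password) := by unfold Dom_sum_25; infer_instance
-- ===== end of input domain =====

-- B replaces A's greedy repeated-subtraction while-loop with a closed-form quotient/remainder computation (simpler).

-- ===== PORT A =====
-- the while-loop of A: while diff > 9: return_str += "9"; diff -= 9; then return_str += str(diff)
def sum25LoopA (diff : Int) (acc : String) : String :=
  if diff > 9 then sum25LoopA (diff - 9) (acc ++ "9") else acc ++ PySem.Int.toStr diff
termination_by diff.toNat
decreasing_by omega

def sum_25 (password : String) : String :=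
  -- for char in password: if char.isdigit(): le_sum += int(char)
  -- int(char) on a single ASCII digit char is exactly (c.toNat - 48)
  let le_sum : Int :=
    password.toList.foldl (fun acc c => if PySem.Chars.isdigit c then acc + ((c.toNat : Int) - 48) else acc) 0
  sum25LoopA (25 - le_sum) ""

-- ===== PORT B =====
def sum_25_alt (password : String) : String :=
  let diff : Int :=
    25 - (((password.toList.filter PySem.Chars.isdigit).map (fun c => (c.toNat : Int) - 48)).sum)
  if diff ≤ 9 then PySem.Int.toStr diff
  else
    let q := PySem.Int.floordiv (diff - 1) 9
    String.ofList (List.replicate q.toNat '9') ++ PySem.Int.toStr (diff - 9 * q)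

-- ===== PRECONDITION & SPEC =====
def Spec_sum_25 (password : String) (out : String) : Prop := out = sum_25_alt password
instance (password : String) (out : String) : Decidable (Spec_sum_25 password out) := by unfold Spec_sum_25; infer_instance

-- ===== CLAIM (what is proved, stated in full; the proofs are below) =====
def Claim_equal_sum_25 : Prop := ∀ (password : String), Dom_sum_25 password → Spec_sum_25 password (sum_25 password)

-- ===== LEMMAS AND PROOFS =====

theorem sum25_fold_eq_sum (l : List Char) (a : Int) :
    l.foldl (fun acc c => if PySem.Chars.isdigit c then acc + ((c.toNat : Int) - 48) else acc) a
      = a + ((l.filter PySem.Chars.isdigit).map (fun c => (c.toNat : Int) - 48)).sum := by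
  induction l generalizing a with
  | nil => simp
  | cons c t ih =>
    by_cases h : PySem.Chars.isdigit c <;> simp [h, ih, add_assoc]

theorem sum25_isdigit_ge (c : Char) (h : PySem.Chars.isdigit c = true) : 48 ≤ (c.toNat : Int) := by
  simp only [PySem.Chars.isdigit, Bool.and_eq_true, decide_eq_true_eq] at h
  have h1 : ('0' : Char).toNat ≤ c.toNat := UInt32.le_iff_toNat_le.mp (Char.le_def.mp h.1)
  simp at h1
  omega

theorem sum25_sum_nonneg (l : List Char) :
    0 ≤ ((l.filter PySem.Chars.isdigit).map (fun c => (c.toNat : Int) - 48)).sum := by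
  apply List.sum_nonneg
  intro x hx
  obtain ⟨c, hc, rfl⟩ := List.mem_map.mp hx
  have := sum25_isdigit_ge c (List.mem_filter.mp hc).2
  omega

theorem sum25LoopA_step (d : Int) (acc : String) (h : d > 9) :
    sum25LoopA d acc = sum25LoopA (d - 9) (acc ++ "9") := by
  rw [sum25LoopA]; simp [h]

theorem sum25LoopA_base (d : Int) (acc : String) (h : ¬ d > 9) :
    sum25LoopA d acc = acc ++ PySem.Int.toStr d := by
  rw [sum25LoopA]; simp [h]

theorem sum25_loop_eq_closed (d : Int) (hle : d ≤ 25) :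
    sum25LoopA d "" =
      (if d ≤ 9 then PySem.Int.toStr d
       else
        String.ofList (List.replicate (PySem.Int.floordiv (d - 1) 9).toNat '9') ++
          PySem.Int.toStr (d - 9 * PySem.Int.floordiv (d - 1) 9)) := by
  by_cases h9 : d ≤ 9
  · rw [sum25LoopA_base d "" (by omega)]
    simp [h9]
  · by_cases h18 : d ≤ 18
    · have hq : PySem.Int.floordiv (d - 1) 9 = 1 := by
        rw [PySem.Int.floordiv_eq_iff_of_pos (by norm_num)]
        omega
      rw [sum25LoopA_step d "" (by omega), sum25LoopA_base (d - 9) _ (by omega),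
          if_neg h9, hq]
      rw [show d - 9 * 1 = d - 9 from by ring]
      congr 1
    · have hq : PySem.Int.floordiv (d - 1) 9 = 2 := by
        rw [PySem.Int.floordiv_eq_iff_of_pos (by norm_num)]
        omega
      rw [sum25LoopA_step d "" (by omega), sum25LoopA_step (d - 9) _ (by omega),
          sum25LoopA_base (d - 9 - 9) _ (by omega), if_neg h9, hq]
      rw [show d - 9 * 2 = d - 9 - 9 from by ring]
      congr 1

-- ===== VERDICT (by name: the statement is the Claim_ definition above) =====
theorem sum_25_spec : Claim_equal_sum_25 := by
  intro password _
  unfold Spec_sum_25 sum_25 sum_25_alt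
  rw [sum25_fold_eq_sum, zero_add]
  have h := sum25_sum_nonneg password.toList
  exact sum25_loop_eq_closed _ (by omega)
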